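-- pv_equiv track=rewrite | github.com/BlissPy/bliss-bot | cogs/misc.py | _escape_codeblocks
-- ===== SOURCE A (Python) =====
-- def _escape_codeblocks(line):
--     if not line:
--         return line
--
--     i = 0
--     n = 0
--     while i < len(line):
--         if (line[i]) == '`':
--             n += 1
--         if n == 3:
--             line = line[:i] + '\u200b' + line[i:]
--             n = 1
--             i += 1
--         i += 1
--
--     if line[-1] == '`':
--         line += '\u200b'
--
--     return line
-- ===== SOURCE B (Python) =====
-- def _escape_codeblocks(line):
--     if not line:
--         return line
--     # Phase 1: split on backticks; backtick k (1-based) sits before parts[k].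
--     parts = line.split('`')
--     # Phase 2: rebuild, inserting '\u200b' before every odd-numbered backtick from the 3rd on.
--     out = [parts[0]]
--     for k, part in enumerate(parts[1:], start=1):
--         if k >= 3 and k % 2 == 1:
--             out.append('\u200b')
--         out.append('`')
--         out.append(part)
--     res = ''.join(out)
--     if line[-1] == '`':
--         res += '\u200b'
--     return res
-- ===== Notes on version B (the rewrite author's own statement) =====
-- stated objective: faster
-- what changed: Replaces A's single index-walk over a string that mutates under it (quadratic re-slicing on each insertion, with a resetting counter) by a two-phase rebuild: split the line on the backtick character, then rejoin the parts inserting the zero-width space before every odd-numbered backtick from the 3rd on.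
import Mathlib
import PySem

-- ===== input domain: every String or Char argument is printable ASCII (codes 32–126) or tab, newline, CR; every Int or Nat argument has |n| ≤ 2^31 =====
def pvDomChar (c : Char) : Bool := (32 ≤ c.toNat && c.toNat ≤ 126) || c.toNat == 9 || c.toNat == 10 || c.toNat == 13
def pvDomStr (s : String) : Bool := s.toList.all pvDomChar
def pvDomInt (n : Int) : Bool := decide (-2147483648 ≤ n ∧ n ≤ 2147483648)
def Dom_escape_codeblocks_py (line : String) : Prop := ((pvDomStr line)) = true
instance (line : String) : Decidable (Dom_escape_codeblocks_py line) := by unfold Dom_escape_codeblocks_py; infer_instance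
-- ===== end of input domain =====

-- B rebuilds the string in two phases (split on backtick, then rejoin with the markers) instead of
-- A's index loop that re-slices the whole mutating string at each insertion (measured faster).

-- ===== PORT A =====
-- A's while loop: i and the resetting counter n walk over the (mutating) string.
def escapeLoopA (l : List Char) (i n : Nat) : List Char :=
  if h : i < l.length then
    let n' := if l.getD i ' ' = '`' then n + 1 else n
    if n' = 3 then
      escapeLoopA (l.take i ++ '\u200b' :: l.drop i) (i + 2) 1
    else
      escapeLoopA l (i + 1) n'
  else l
termination_by l.length - i
decreasing_by
  all_goals
    (try simp only [List.length_append, List.length_take, List.length_cons, List.length_drop])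
  all_goals omega

def escape_codeblocks_py (line : String) : String :=
  if line = "" then line
  else
    let l := escapeLoopA line.toList 0 0
    let l := if PySem.List.pyGet? l (-1) = some '`' then l ++ ['\u200b'] else l
    String.mk l

-- ===== PORT B =====
-- Python's line.split('`'), transliterated over the character list (exact: str.split with a
-- one-character separator keeps empty parts, exactly this recursion).
def pySplitBt : List Char → List (List Char)
  | [] => [[]]
  | c :: rest =>
    if c = '`' then [] :: pySplitBt rest
    else
      match pySplitBt rest with
      | [] => [[c]]           -- unreachable: pySplitBt never returns []
      | p :: ps => (c :: p) :: ps

def escape_codeblocks_py_alt (line : String) : String :=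
  if line = "" then line
  else
    let parts := pySplitBt line.toList
    let out := ((parts.drop 1).zipIdx 1).foldl
      (fun acc pk => acc ++ (if 3 ≤ pk.2 ∧ pk.2 % 2 = 1 then ['\u200b'] else []) ++ '`' :: pk.1)
      (parts.headD [])
    -- line[-1] == '`' on the (nonempty) original string; getLast? is exact here
    let out := if line.toList.getLast? = some '`' then out ++ ['\u200b'] else out
    String.mk out

-- ===== PRECONDITION & SPEC =====
def Spec_escape_codeblocks_py (line : String) (out : String) : Prop := out = escape_codeblocks_py_alt line
instance (line : String) (out : String) : Decidable (Spec_escape_codeblocks_py line out) := by unfold Spec_escape_codeblocks_py; infer_instance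

-- ===== CLAIM (what is proved, stated in full; the proofs are below) =====
def Claim_equal_escape_codeblocks_py : Prop := ∀ (line : String), Dom_escape_codeblocks_py line → Spec_escape_codeblocks_py line (escape_codeblocks_py line)

-- ===== LEMMAS AND PROOFS =====

-- A's loop body as structural recursion on the unprocessed suffix, with A's resetting counter.
def fA : List Char → Nat → List Char
  | [], _ => []
  | c :: rest, n =>
    if (if c = '`' then n + 1 else n) = 3 then '\u200b' :: c :: fA rest 1
    else c :: fA rest (if c = '`' then n + 1 else n)

-- the same transformation driven by the TOTAL backtick count m: insert before occurrences 3,5,7,…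
def hT : List Char → Nat → List Char
  | [], _ => []
  | c :: rest, m =>
    if c = '`' then
      (if 3 ≤ m + 1 ∧ (m + 1) % 2 = 1 then ['\u200b'] else []) ++ c :: hT rest (m + 1)
    else c :: hT rest m

-- the closed form of B's fold
def goB : List (List Char) → Nat → List Char
  | [], _ => []
  | p :: ps, k => (if 3 ≤ k ∧ k % 2 = 1 then ['\u200b'] else []) ++ '`' :: p ++ goB ps (k + 1)

theorem escapeLoopA_eq (l : List Char) (i n : Nat) :
    escapeLoopA l i n = l.take i ++ fA (l.drop i) n := by
  by_cases h : i < l.length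
  · have hdrop : l.drop i = l[i] :: l.drop (i + 1) := List.drop_eq_getElem_cons h
    have hlentake : (l.take i).length = i := by simp [List.length_take]; omega
    rw [escapeLoopA]
    simp only [h, dif_pos]
    have hgetD : l.getD i ' ' = l[i] := List.getD_eq_getElem l ' ' h
    rw [hgetD]
    have hfA : fA (l.drop i) n =
        if (if l[i] = '`' then n + 1 else n) = 3 then '\u200b' :: l[i] :: fA (l.drop (i + 1)) 1
        else l[i] :: fA (l.drop (i + 1)) (if l[i] = '`' then n + 1 else n) := by
      rw [hdrop]; rfl
    by_cases h3 : (if l[i] = '`' then n + 1 else n) = 3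
    · rw [if_pos h3]
      rw [escapeLoopA_eq (l.take i ++ '\u200b' :: l.drop i) (i + 2) 1]
      have htake : (l.take i ++ '\u200b' :: l.drop i).take (i + 2)
          = l.take i ++ ['\u200b', l[i]] := by
        rw [List.take_append, List.take_of_length_le (by omega), hlentake,
          show i + 2 - i = 2 from by omega, hdrop]
        rfl
      have hdrop2 : (l.take i ++ '\u200b' :: l.drop i).drop (i + 2) = l.drop (i + 1) := by
        rw [List.drop_append, List.drop_eq_nil_of_le (by omega), hlentake,
          show i + 2 - i = 2 from by omega, hdrop]
        rfl
      rw [htake, hdrop2, hfA, if_pos h3]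
      simp
    · rw [if_neg h3]
      rw [escapeLoopA_eq l (i + 1) (if l[i] = '`' then n + 1 else n)]
      have htake1 : l.take (i + 1) = l.take i ++ [l[i]] := by
        rw [List.take_add_one, List.getElem?_eq_getElem h]; rfl
      rw [hfA, if_neg h3, htake1, List.append_assoc]
      rfl
  · rw [escapeLoopA]
    simp only [h, dif_neg, not_false_iff]
    rw [List.drop_eq_nil_of_le (le_of_not_gt h), List.take_of_length_le (le_of_not_gt h)]
    simp [fA]
termination_by l.length - i
decreasing_by
  all_goals
    (try simp only [List.length_append, List.length_take, List.length_cons, List.length_drop])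
  all_goals omega

theorem fA_eq_hT (l : List Char) (n m : Nat)
    (hnm : (m < 3 ∧ n = m) ∨ (3 ≤ m ∧ n = 2 - m % 2)) : fA l n = hT l m := by
  induction l generalizing n m with
  | nil => rfl
  | cons c rest ih =>
    by_cases hc : c = '`'
    · simp only [fA, hT, if_pos hc]
      by_cases h3 : n + 1 = 3
      · have hm : 3 ≤ m + 1 ∧ (m + 1) % 2 = 1 := by omega
        rw [if_pos h3, if_pos hm, ih 1 (m + 1) (by omega)]
        simp
      · have hm : ¬(3 ≤ m + 1 ∧ (m + 1) % 2 = 1) := by omega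
        rw [if_neg h3, if_neg hm, ih (n + 1) (m + 1) (by omega)]
        simp
    · simp only [fA, hT, if_neg hc]
      rw [if_neg (show ¬n = 3 from by omega), ih n m hnm]

theorem getLast?_cons_ne {c : Char} (X : List Char) (h : X ≠ []) :
    (c :: X).getLast? = X.getLast? := by
  rw [List.getLast?_cons]
  cases hX : X.getLast? with
  | none => exact absurd (List.getLast?_eq_none_iff.mp hX) h
  | some x => simp

theorem hT_getLast (l : List Char) (m : Nat) (hne : l ≠ []) :
    (hT l m).getLast? = l.getLast? := by
  induction l generalizing m with
  | nil => exact absurd rfl hne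
  | cons c rest ih =>
    by_cases hr : rest = []
    · subst hr
      by_cases hc : c = '`'
      · subst hc
        simp only [hT, if_true]
        split <;> simp
      · simp [hT, hc]
    · have h1 : (hT rest (m + 1)).getLast? = rest.getLast? := ih (m + 1) hr
      have h2 : (hT rest m).getLast? = rest.getLast? := ih m hr
      have hne1 : hT rest (m + 1) ≠ [] := by
        intro hh; rw [hh] at h1; exact hr (List.getLast?_eq_none_iff.mp h1.symm)
      have hne2 : hT rest m ≠ [] := by
        intro hh; rw [hh] at h2; exact hr (List.getLast?_eq_none_iff.mp h2.symm)
      obtain ⟨y, hy⟩ : ∃ y, rest.getLast? = some y := by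
        cases hX : rest.getLast? with
        | none => exact absurd (List.getLast?_eq_none_iff.mp hX) hr
        | some y => exact ⟨y, rfl⟩
      by_cases hc : c = '`'
      · simp only [hT, if_pos hc]
        rw [List.getLast?_append, getLast?_cons_ne _ hne1, h1, hy,
          getLast?_cons_ne rest hr, hy]
        rfl
      · simp only [hT, if_neg hc]
        rw [getLast?_cons_ne _ hne2, h2, getLast?_cons_ne rest hr]

theorem hT_noBt (s t : List Char) (m : Nat) (hs : '`' ∉ s) :
    hT (s ++ t) m = s ++ hT t m := by
  induction s with
  | nil => rfl
  | cons c cs ih =>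
    have hc : c ≠ '`' := fun h => hs (h ▸ List.mem_cons_self)
    simp [hT, hc, ih (fun h => hs (List.mem_cons_of_mem _ h))]

-- flatMap form of '`'-joining the tail parts
theorem hT_join (ps : List (List Char)) (m : Nat) (hps : ∀ p ∈ ps, '`' ∉ p) :
    hT (ps.flatMap (fun p => '`' :: p)) m = goB ps (m + 1) := by
  induction ps generalizing m with
  | nil => rfl
  | cons p rest ih =>
    have hp : '`' ∉ p := hps p List.mem_cons_self
    have hrest : ∀ q ∈ rest, '`' ∉ q := fun q hq => hps q (List.mem_cons_of_mem _ hq)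
    simp only [List.flatMap_cons, List.cons_append, hT, if_true]
    rw [hT_noBt p _ (m + 1) hp, ih (m + 1) hrest]
    simp [goB]

theorem pySplitBt_ne_nil (l : List Char) : pySplitBt l ≠ [] := by
  cases l with
  | nil => simp [pySplitBt]
  | cons c rest =>
    simp only [pySplitBt]
    split
    · simp
    · cases pySplitBt rest <;> simp

theorem pySplitBt_noBt (l : List Char) : ∀ p ∈ pySplitBt l, '`' ∉ p := by
  induction l with
  | nil => simp [pySplitBt]
  | cons c rest ih =>
    intro p hp
    simp only [pySplitBt] at hp
    split at hp
    · rcases List.mem_cons.mp hp with h | h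
      · simp [h]
      · exact ih p h
    · rename_i hc
      cases hsp : pySplitBt rest with
      | nil => exact absurd hsp (pySplitBt_ne_nil rest)
      | cons q qs =>
        rw [hsp] at hp
        rcases List.mem_cons.mp hp with h | h
        · subst h
          intro hmem
          rcases List.mem_cons.mp hmem with h | h
          · exact hc h.symm
          · exact ih q (hsp ▸ List.mem_cons_self) h
        · exact ih p (hsp ▸ List.mem_cons_of_mem _ h)

theorem pySplitBt_recombine (l : List Char) :
    (pySplitBt l).headD [] ++ ((pySplitBt l).drop 1).flatMap (fun p => '`' :: p) = l := by
  induction l with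
  | nil => rfl
  | cons c rest ih =>
    simp only [pySplitBt]
    split
    · rename_i hc
      simp [hc]
      cases hsp : pySplitBt rest with
      | nil => exact absurd hsp (pySplitBt_ne_nil rest)
      | cons q qs => rw [hsp] at ih; simpa using ih
    · cases hsp : pySplitBt rest with
      | nil => exact absurd hsp (pySplitBt_ne_nil rest)
      | cons q qs =>
        rw [hsp] at ih
        simpa using ih

theorem foldB_eq_goB (ps : List (List Char)) (k : Nat) (acc : List Char) :
    (ps.zipIdx k).foldl
      (fun acc pk => acc ++ (if 3 ≤ pk.2 ∧ pk.2 % 2 = 1 then ['\u200b'] else []) ++ '`' :: pk.1)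
      acc = acc ++ goB ps k := by
  induction ps generalizing k acc with
  | nil => simp [goB]
  | cons p rest ih =>
    simp only [List.zipIdx_cons, List.foldl_cons]
    rw [ih (k + 1)]
    simp [goB]

theorem hT_nonempty_getLast (l : List Char) (hne : l ≠ []) :
    PySem.List.pyGet? (hT l 0) (-1) = l.getLast? := by
  rw [PySem.List.pyGet?_neg_one]
  exact hT_getLast l 0 hne

-- main equality on the character lists, for nonempty input
theorem core_eq (l : List Char) :
    hT l 0 = (pySplitBt l).headD [] ++ goB ((pySplitBt l).drop 1) 1 := by
  conv_lhs => rw [← pySplitBt_recombine l]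
  have hhead : '`' ∉ (pySplitBt l).headD [] := by
    cases hsp : pySplitBt l with
    | nil => exact absurd hsp (pySplitBt_ne_nil l)
    | cons q qs => simpa using pySplitBt_noBt l q (hsp ▸ List.mem_cons_self)
  rw [hT_noBt _ _ 0 hhead]
  rw [hT_join _ 0 (fun p hp => pySplitBt_noBt l p (List.mem_of_mem_drop hp))]

-- ===== VERDICT (by name: the statement is the Claim_ definition above) =====
theorem escape_codeblocks_py_spec : Claim_equal_escape_codeblocks_py := by
  intro line _
  unfold Spec_escape_codeblocks_py
  by_cases hline : line = ""
  · simp [escape_codeblocks_py, escape_codeblocks_py_alt, hline]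
  · have hne : line.toList ≠ [] := fun h => hline (String.toList_eq_nil_iff.mp h)
    have hloop : escapeLoopA line.toList 0 0 = hT line.toList 0 := by
      rw [escapeLoopA_eq]
      simp only [List.take_zero, List.drop_zero, List.nil_append]
      exact fA_eq_hT line.toList 0 0 (Or.inl ⟨by omega, rfl⟩)
    simp only [escape_codeblocks_py, escape_codeblocks_py_alt, if_neg hline]
    rw [hloop, hT_nonempty_getLast line.toList hne, core_eq line.toList, foldB_eq_goB]
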